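-- pv_equiv track=rewrite | github.com/Ruyllex/TP1_sinergia | generar_diccionario.py | armar_diccionario
-- ===== SOURCE A (Python) =====
-- def identificar_caracter_especial(texto):
--
--     """Itera la cadena e identifica caracteres no alfabeticos. Ruy Mori"""
--
--     # CORRECCION: Está bien la idea de querer identificar los caracteres especiales en el texto, pero en este caso está mal ejecutada, porque en esta función recorren todos los caracteres para
--     # identificar los especiales; y luego, en "eliminar_caraceteres_especiales" vuelven a recorrer toda la lista para ponerlos en blanco.
--
--     caracteres_especiales = []
--     for palabra in texto:
--         for caracter in palabra:
--             if not caracter.isalpha():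
--                 lista_caracteres_especiales(caracter, caracteres_especiales)
--     return caracteres_especiales
--
-- def lista_caracteres_especiales(caracter, caracteres_especiales):
--
--     """Arma una lista de caracteres especiales y numericos sin repetir (no contempla ' ' para simplificar tareas posteriores).
--     Ruy Mori"""
--
--     if caracter not in caracteres_especiales and caracter != " ":
--         caracteres_especiales.append(caracter)
--     return caracteres_especiales
--
-- def eliminar_caracteres_especiales(texto, caracteres_especiales):
--
--     """Elimina los caracteres no alfabeticos de la cadena
--     Ruy Mori"""
--
--     LONGITUD1 = len(caracteres_especiales)
--     for i in range(LONGITUD1):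
--             texto = texto.replace(caracteres_especiales[i], " ")
--     return texto #esto deberia ser una linea del main() porque la funcion esta haciendo 2 cosas # CORRECCION: ver la correccion del fondo del archivo
--
-- def armar_lista_de_palabras(texto):
--
--     """Arma la lista de palabras, sin repetir, todas en minuscula y de minimo 5 caracteres
--     Ruy Mori"""
--
--     lista_palabras_sin_repetir = []
--     lista_palabras = texto.split(" ")
--     for palabra in lista_palabras:
--         if palabra.lower() not in lista_palabras_sin_repetir and palabra != '' and len(palabra) >= 5: # CORRECCION: Faltan constantes
--             lista_palabras_sin_repetir.append(palabra.lower())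
--     return lista_palabras_sin_repetir
--
-- def armar_diccionario(texto):
--
--     """Arma el diccionario con las palabras en orden alfabetico como claves, y cada una contiene la cantidad de veces que aparece en la cadena original
--     Ruy Mori"""
--
--     caracteres_especiales = identificar_caracter_especial(texto)
--     texto = eliminar_caracteres_especiales(texto, caracteres_especiales).lower()
--     lista_de_palabras = armar_lista_de_palabras(texto)
--     diccionario_palabras = {}
--     lista_ordenada = sorted(lista_de_palabras)
--     for palabra in lista_ordenada:
--         apariciones = texto.count(palabra)
--         diccionario_palabras[palabra] = apariciones
--     return diccionario_palabras
-- ===== SOURCE B (Python) =====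
-- def armar_diccionario(texto):
--     """One pass builds the cleaned text (non-alpha -> space, lowercased); unique >=5-char words
--     are a set; result maps each sorted word to its substring count in the cleaned text."""
--     limpio = ''.join(c.lower() if c.isalpha() else ' ' for c in texto)
--     palabras = {p for p in limpio.split(' ') if len(p) >= 5}
--     return {p: limpio.count(p) for p in sorted(palabras)}
-- ===== Notes on version B (the rewrite author's own statement) =====
-- stated objective: simpler
-- what changed: A collects the distinct special characters and runs one full replace pass per special before lowercasing and deduplicating words with a list-membership loop; B builds the cleaned lowercase text in a single per-character pass and takes the unique long words as a set comprehension, mapping each sorted word to its substring count.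
import Mathlib
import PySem

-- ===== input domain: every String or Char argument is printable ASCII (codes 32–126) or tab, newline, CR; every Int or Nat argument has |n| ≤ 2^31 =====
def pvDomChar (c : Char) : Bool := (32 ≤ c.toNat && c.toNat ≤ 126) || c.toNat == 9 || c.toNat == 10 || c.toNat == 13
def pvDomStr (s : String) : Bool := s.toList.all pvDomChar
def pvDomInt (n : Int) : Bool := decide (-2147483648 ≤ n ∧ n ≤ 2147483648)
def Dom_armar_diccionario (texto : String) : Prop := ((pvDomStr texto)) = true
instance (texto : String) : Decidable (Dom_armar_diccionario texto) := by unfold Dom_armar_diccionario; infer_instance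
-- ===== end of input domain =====

-- B replaces A's collect-specials-then-replace-per-special cleaning and list-membership word dedup
-- by a single per-character cleaning pass and a set of the long tokens (objective: simpler).


-- ===== PORT A =====

def lista_caracteres_especiales (caracter : Char) (caracteres_especiales : List Char) : List Char :=
  if caracter ∉ caracteres_especiales ∧ caracter ≠ ' ' then caracteres_especiales ++ [caracter]
  else caracteres_especiales

-- Python iterates the string (yielding 1-char strings), then iterates each 1-char string again:
-- ported as the nested fold over the singleton list [palabra].
def identificar_caracter_especial (texto : String) : List Char :=
  texto.toList.foldl
    (fun acc palabra =>
      [palabra].foldl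
        (fun acc2 caracter =>
          if ¬ (PySem.Chars.isalpha caracter = true) then lista_caracteres_especiales caracter acc2
          else acc2)
        acc)
    []

def eliminar_caracteres_especiales (texto : String) (caracteres_especiales : List Char) : String :=
  (PySem.List.pyRange 0 (PySem.List.len caracteres_especiales)).foldl
    (fun t i => PySem.Str.replace t (String.ofList [PySem.List.pyGetD caracteres_especiales i ' ']) " ")
    texto

def armar_lista_de_palabras (texto : String) : List String :=
  -- texto.split(" "): the separator is nonempty, so split? is some and getD [] is exact
  let lista_palabras := (PySem.Str.split? texto " ").getD []
  lista_palabras.foldl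
    (fun acc palabra =>
      if PySem.Str.lower palabra ∉ acc ∧ palabra ≠ "" ∧ (5 : Int) ≤ PySem.Str.len palabra then
        acc ++ [PySem.Str.lower palabra]
      else acc)
    []

def armar_diccionario (texto : String) : List (String × Int) :=
  let caracteres_especiales := identificar_caracter_especial texto
  let texto1 := PySem.Str.lower (eliminar_caracteres_especiales texto caracteres_especiales)
  let lista_de_palabras := armar_lista_de_palabras texto1
  let lista_ordenada := PySem.List.sorted lista_de_palabras (fun w => w) false
  (lista_ordenada.foldl
    (fun d palabra => PySem.Dict.insert d palabra ((PySem.Str.count texto1 palabra : Int)))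
    PySem.Dict.empty).items

-- ===== PORT B =====

def armar_diccionario_alt (texto : String) : List (String × Int) :=
  let limpio := String.ofList (texto.toList.map
    (fun c => if PySem.Chars.isalpha c then PySem.Chars.lowerChar c else ' '))
  let palabras : PySem.Set String :=
    PySem.Set.ofList (((PySem.Str.split? limpio " ").getD []).filter
      (fun p => decide ((5 : Int) ≤ PySem.Str.len p)))
  (PySem.List.sorted palabras (fun w => w) false).map
    (fun p => (p, (PySem.Str.count limpio p : Int)))

-- ===== PRECONDITION & SPEC =====
def Spec_armar_diccionario (texto : String) (out : List (String × Int)) : Prop := out = armar_diccionario_alt texto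
instance (texto : String) (out : List (String × Int)) : Decidable (Spec_armar_diccionario texto out) := by unfold Spec_armar_diccionario; infer_instance

-- ===== CLAIM (what is proved, stated in full; the proofs are below) =====
def Claim_equal_armar_diccionario : Prop := ∀ (texto : String), Dom_armar_diccionario texto → Spec_armar_diccionario texto (armar_diccionario texto)

-- ===== LEMMAS AND PROOFS =====

theorem lowerChar_idem (c : Char) : PySem.Chars.lowerChar (PySem.Chars.lowerChar c) = PySem.Chars.lowerChar c := by
  unfold PySem.Chars.lowerChar PySem.Chars.isupper
  by_cases h : ('A' ≤ c ∧ c ≤ 'Z')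
  · have h65 : 65 ≤ c.toNat := Fin.mk_le_mk.mp h.1
    have h90 : c.toNat ≤ 90 := Fin.mk_le_mk.mp h.2
    simp only [h.1, h.2, decide_true, Bool.and_self, if_true]
    have hv : (Char.ofNat (c.toNat + 32)).toNat = c.toNat + 32 := by
      rw [Char.toNat_ofNat, if_pos]
      constructor; omega
    have : ¬ ((Char.ofNat (c.toNat + 32)) ≤ 'Z') := by
      intro hle
      have := Fin.mk_le_mk.mp hle
      have h2 : (Char.ofNat (c.toNat + 32)).toNat ≤ 90 := this
      omega
    simp [this]
  · rcases not_and_or.mp h with h1 | h1 <;> simp [h1]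


theorem mem_identificar_aux (l : List Char) (acc : List Char) (x : Char) :
    x ∈ l.foldl (fun a c => if ¬ (PySem.Chars.isalpha c = true) then lista_caracteres_especiales c a else a) acc ↔
      x ∈ acc ∨ (x ∈ l ∧ PySem.Chars.isalpha x = false ∧ x ≠ ' ') := by
  induction l generalizing acc with
  | nil => simp
  | cons c t ih =>
    simp only [List.foldl_cons]
    by_cases ha : PySem.Chars.isalpha c = true
    · rw [if_neg (by simpa using ha), ih]
      by_cases hxc : x = c
      · subst hxc; simp [ha]
      · simp [hxc]
    · rw [if_pos (by simpa using ha)]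
      by_cases hm : c ∉ acc ∧ c ≠ ' '
      · have e : lista_caracteres_especiales c acc = acc ++ [c] := if_pos hm
        rw [e, ih]
        by_cases hxc : x = c
        · subst hxc
          simp [List.mem_append, (by simpa using ha : PySem.Chars.isalpha x = false), hm.2]
        · simp [List.mem_append, hxc]
      · have e : lista_caracteres_especiales c acc = acc := if_neg hm
        rw [e, ih]
        by_cases hxc : x = c
        · subst hxc
          by_cases hsp : x = ' '
          · simp [hsp]
          · have hin : x ∈ acc := by tauto
            simp [hin]
        · simp [hxc]


theorem replace_go_singleton (c : Char) (fuel : Nat) (l acc : List Char) (h : l.length ≤ fuel) :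
    PySem.Chars.replace.go [c] [' '] fuel l acc
      = acc.reverse ++ l.map (fun x => if x = c then ' ' else x) := by
  induction fuel generalizing l acc with
  | zero =>
    have : l = [] := List.length_eq_zero_iff.mp (Nat.le_zero.mp h)
    subst this; simp [PySem.Chars.replace.go]
  | succ f ih =>
    cases l with
    | nil => simp [PySem.Chars.replace.go]
    | cons x t =>
      rw [PySem.Chars.replace.go]
      by_cases hxc : x = c
      · subst hxc
        have hp : List.isPrefixOf [x] (x :: t) = true := by simp [List.isPrefixOf]
        simp only [hp, if_true, List.length_cons] at *
        rw [ih _ _ (by simpa using Nat.le_of_succ_le_succ h)]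
        simp
      · have hp : List.isPrefixOf [c] (x :: t) = false := by
          simp [List.isPrefixOf, Ne.symm hxc]
        simp only [hp, Bool.false_eq_true, if_false]
        rw [ih _ _ (by simpa using Nat.le_of_succ_le_succ (by simpa using h))]
        simp [hxc]

theorem replace_singleton (l : List Char) (c : Char) :
    PySem.Chars.replace l [c] [' '] = l.map (fun x => if x = c then ' ' else x) := by
  rw [PySem.Chars.replace]
  simp [replace_go_singleton c l.length l [] le_rfl]

theorem fold_replace (S : List Char) (hS : ∀ c ∈ S, c ≠ ' ') (l : List Char) :
    S.foldl (fun t c => PySem.Chars.replace t [c] [' ']) l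
      = l.map (fun x => if x ∈ S then ' ' else x) := by
  induction S generalizing l with
  | nil => simp
  | cons s S' ih =>
    have hsp : (' ' : Char) ∉ S' := fun h => (hS ' ' (List.mem_cons_of_mem s h)) rfl
    rw [List.foldl_cons, replace_singleton, ih (fun c hc => hS c (List.mem_cons_of_mem s hc)),
        List.map_map]
    apply List.map_congr_left
    intro x _
    by_cases hxs : x = s
    · subst hxs
      simp [hsp]
    · simp only [Function.comp_apply, if_neg hxs, List.mem_cons]
      by_cases hx : x ∈ S' <;> simp [hx, hxs]


theorem splitOn_go_pred (p : Char → Prop) (sep : List Char) (fuel : Nat) (l cur : List Char)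
    (acc : List (List Char)) (hl : ∀ c ∈ l, p c) (hcur : ∀ c ∈ cur, p c)
    (hacc : ∀ a ∈ acc, ∀ c ∈ a, p c) :
    ∀ t ∈ PySem.Chars.splitOn.go sep fuel l cur acc, ∀ c ∈ t, p c := by
  induction fuel generalizing l cur acc with
  | zero =>
    rw [PySem.Chars.splitOn.go]
    intro t ht c hc
    simp only [List.mem_reverse, List.mem_cons] at ht
    rcases ht with rfl | ht
    · rcases List.mem_append.mp hc with h | h
      · exact hcur c (List.mem_reverse.mp h)
      · exact hl c h
    · exact hacc t ht c hc
  | succ f ih =>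
    cases l with
    | nil =>
      rw [PySem.Chars.splitOn.go]
      · intro t ht c hc
        simp only [List.mem_reverse, List.mem_cons] at ht
        rcases ht with rfl | ht
        · exact hcur c (List.mem_reverse.mp hc)
        · exact hacc t ht c hc
      · omega
    | cons x rest =>
      rw [PySem.Chars.splitOn.go]
      by_cases hp : List.isPrefixOf sep (x :: rest) = true
      · simp only [hp, if_true]
        apply ih
        · intro c hc; exact hl c (List.mem_of_mem_drop hc)
        · intro c hc; simp at hc
        · intro a ha c hc
          rcases List.mem_cons.mp ha with rfl | ha
          · exact hcur c (List.mem_reverse.mp hc)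
          · exact hacc a ha c hc
      · simp only [hp, Bool.false_eq_true, if_false]
        apply ih
        · intro c hc; exact hl c (List.mem_cons_of_mem x hc)
        · intro c hc
          rcases List.mem_cons.mp hc with rfl | hc
          · exact hl c (List.mem_cons_self ..)
          · exact hcur c hc
        · exact hacc

theorem splitOn_chars_subset (sep l : List Char) (t : List Char)
    (ht : t ∈ PySem.Chars.splitOn l sep) (c : Char) (hc : c ∈ t) : c ∈ l := by
  rw [PySem.Chars.splitOn] at ht
  exact splitOn_go_pred (fun c => c ∈ l) sep (l.length + 1) l [] []
    (fun _ h => h) (by simp) (by simp) t ht c hc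


theorem mem_identificar (texto : String) (x : Char) :
    x ∈ identificar_caracter_especial texto ↔
      x ∈ texto.toList ∧ PySem.Chars.isalpha x = false ∧ x ≠ ' ' := by
  unfold identificar_caracter_especial
  simp only [List.foldl_cons, List.foldl_nil]
  rw [mem_identificar_aux]
  simp

theorem eliminar_toList (texto : String) (S : List Char) :
    (eliminar_caracteres_especiales texto S).toList
      = S.foldl (fun l c => PySem.Chars.replace l [c] [' ']) texto.toList := by
  unfold eliminar_caracteres_especiales
  rw [PySem.List.foldl_pyRange_pyGetD S ' '
    (fun t c => PySem.Str.replace t (String.ofList [c]) " ") texto (by norm_num)]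
  simp only [Int.toNat_zero, List.drop_zero]
  induction S generalizing texto with
  | nil => simp
  | cons c t ih =>
    simp only [List.foldl_cons]
    rw [ih]
    congr 1
    rw [PySem.Str.replace]
    simp [String.toList_ofList]

theorem lowerChar_space : PySem.Chars.lowerChar ' ' = ' ' := by decide

theorem cleaned_eq (texto : String) :
    PySem.Str.lower (eliminar_caracteres_especiales texto (identificar_caracter_especial texto))
      = String.ofList (texto.toList.map
          (fun c => if PySem.Chars.isalpha c then PySem.Chars.lowerChar c else ' ')) := by
  rw [PySem.Str.lower]
  congr 1
  rw [PySem.Chars.lower, eliminar_toList,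
      fold_replace _ (fun c hc => ((mem_identificar texto c).mp hc).2.2),
      List.map_map]
  apply List.map_congr_left
  intro x hx
  by_cases ha : PySem.Chars.isalpha x = true
  · have : x ∉ identificar_caracter_especial texto := by
      rw [mem_identificar]; simp [ha]
    simp [Function.comp_apply, this, ha]
  · have ha' : PySem.Chars.isalpha x = false := by simpa using ha
    by_cases hsp : x = ' '
    · subst hsp
      have : (' ' : Char) ∉ identificar_caracter_especial texto := by
        rw [mem_identificar]; simp
      simp [Function.comp_apply, this, ha', lowerChar_space]
    · have : x ∈ identificar_caracter_especial texto := by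
        rw [mem_identificar]; exact ⟨hx, ha', hsp⟩
      simp [Function.comp_apply, this, ha', lowerChar_space]


theorem tokens_eq (s : String) :
    (PySem.Str.split? s " ").getD []
      = (PySem.Chars.splitOn s.toList [' ']).map String.ofList := by
  rw [PySem.Str.split?, PySem.Chars.split?]
  rfl

theorem token_lower_eq (texto : String) (p : String)
    (hp : p ∈ (PySem.Str.split? (String.ofList (texto.toList.map
          (fun c => if PySem.Chars.isalpha c then PySem.Chars.lowerChar c else ' '))) " ").getD []) :
    PySem.Str.lower p = p := by
  rw [tokens_eq] at hp
  rcases List.mem_map.mp hp with ⟨t, ht, rfl⟩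
  rw [PySem.Str.lower]
  congr 1
  rw [String.toList_ofList, PySem.Chars.lower]
  conv_rhs => rw [← List.map_id t]
  apply List.map_congr_left
  intro c hc
  have hcl : c ∈ (String.ofList (texto.toList.map
      (fun c => if PySem.Chars.isalpha c then PySem.Chars.lowerChar c else ' '))).toList :=
    splitOn_chars_subset [' '] _ t ht c hc
  rw [String.toList_ofList] at hcl
  rcases List.mem_map.mp hcl with ⟨x, _, rfl⟩
  by_cases ha : PySem.Chars.isalpha x = true
  · simp [ha, lowerChar_idem]
  · simp [ha]
    decide

theorem lista_eq (texto : String) :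
    armar_lista_de_palabras (String.ofList (texto.toList.map
          (fun c => if PySem.Chars.isalpha c then PySem.Chars.lowerChar c else ' ')))
      = PySem.Set.ofList (((PySem.Str.split? (String.ofList (texto.toList.map
          (fun c => if PySem.Chars.isalpha c then PySem.Chars.lowerChar c else ' '))) " ").getD []).filter
          (fun p => decide ((5 : Int) ≤ PySem.Str.len p))) := by
  unfold armar_lista_de_palabras
  rw [PySem.List.foldl_congr_mem _ _
      (fun acc p => if p ≠ "" ∧ (5 : Int) ≤ PySem.Str.len p then PySem.Set.add acc p else acc) _
      (by
        intro acc p hp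
        rw [token_lower_eq texto p hp]
        by_cases hm : p ∈ acc
        · by_cases hc : p ≠ "" ∧ (5 : Int) ≤ PySem.Str.len p <;>
            simp [hm, hc, PySem.Set.add, PySem.Set.contains]
        · by_cases hc : p ≠ "" ∧ (5 : Int) ≤ PySem.Str.len p <;>
            simp [hm, hc, PySem.Set.add, PySem.Set.contains])]
  rw [PySem.List.foldl_ite_eq_foldl_filter (fun p => p ≠ "" ∧ (5 : Int) ≤ PySem.Str.len p)
      PySem.Set.add]
  rw [PySem.Set.ofList]
  congr 1
  apply List.filter_congr
  intro p _
  by_cases h0 : p = ""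
  · subst h0; simp [PySem.Str.len]
  · simp [h0]


theorem items_foldl_insert (f : String → Int) (l : List String) (d : PySem.Dict String Int)
    (hn : l.Nodup) (hf : ∀ k ∈ l, d.contains k = false) :
    (l.foldl (fun d p => PySem.Dict.insert d p (f p)) d).items
      = d.items ++ l.map (fun p => (p, f p)) := by
  induction l generalizing d with
  | nil => simp
  | cons k t ih =>
    simp only [List.foldl_cons, List.map_cons]
    have hk : d.contains k = false := hf k (List.mem_cons_self ..)
    have hins : PySem.Dict.insert d k (f k) = ⟨d.items ++ [(k, f k)]⟩ := by
      rw [PySem.Dict.insert, if_neg (by simp [hk])]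
    rw [hins, ih _ (List.Nodup.of_cons hn)]
    · simp
    · intro k' hk'
      have hne : k' ≠ k := fun h => (List.nodup_cons.mp hn).1 (h ▸ hk')
      have := hf k' (List.mem_cons_of_mem k hk')
      rw [PySem.Dict.contains] at *
      simp_all [List.any_append]
      exact ⟨this, fun h : k = k' => hne h.symm⟩

-- ===== VERDICT (by name: the statement is the Claim_ definition above) =====
theorem armar_diccionario_spec : Claim_equal_armar_diccionario := by
  intro texto _
  dsimp only [Spec_armar_diccionario, armar_diccionario, armar_diccionario_alt]
  rw [cleaned_eq texto, lista_eq texto]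
  have hnodup : (PySem.List.sorted
      (PySem.Set.ofList (((PySem.Str.split? (String.ofList (texto.toList.map
        (fun c => if PySem.Chars.isalpha c then PySem.Chars.lowerChar c else ' '))) " ").getD []).filter
        (fun p => decide ((5 : Int) ≤ PySem.Str.len p)))) (fun w => w) false).Nodup :=
    (PySem.List.sorted_perm _ _ _).nodup_iff.mpr (PySem.Set.nodup_ofList _)
  rw [items_foldl_insert _ _ _ hnodup
      (by intro k _; simp [PySem.Dict.contains, PySem.Dict.empty])]
  simp [PySem.Dict.empty]
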